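-- pv_equiv track=rewrite | github.com/MaksymTaran25/BMI-6018-Homework | wk_6_homework-1.py | wrong_add_function
-- ===== SOURCE A (Python) =====
-- def wrong_add_function(arg1,arg2):
--    '''
--    The function takes in two lists of integers, then it adds
--    all of arg2 to each item of arg1.
--
--    Example:
--       > wrong_add_function([1,2,3],[1,1,1])
--       > [6,9,12]
--
--    whereas the expected correct answer is, [2,3,4]
--
--    Parameters
--    ----------
--    arg1 : list
--       list of integers.
--    arg2 : list
--       list of integers.
--
--    Returns
--    -------
--    arg1 : list
--       Elements of arg1, with each element having had the contents of
--       arg2 added to it.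
--
--    '''
--
--    arg1_index=0
--    while arg1_index < len(arg1):
--       arg_2_sum = 0
--       for arg2_elements in arg2:
--          arg_2_sum = sum([arg1[arg1_index]+i for i in arg2])
--       arg1[arg1_index]=arg_2_sum
--       arg1_index+=1
--    return arg1
-- ===== SOURCE B (Python) =====
-- def wrong_add_function(arg1, arg2):
--     # Closed form: each element becomes len(arg2)*x + sum(arg2).
--     # (A mutates arg1 in place; B returns a new list - return value only.)
--     m = len(arg2)
--     s = sum(arg2)
--     return [m * x + s for x in arg1]
-- ===== Notes on version B (the rewrite author's own statement) =====
-- stated objective: faster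
-- what changed: Replaced the while loop with a redundantly repeated inner sum-of-comprehension (O(n*m^2)) by precomputing len(arg2) and sum(arg2) once and mapping x -> len*x + sum over arg1 (O(n+m)).
import Mathlib
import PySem

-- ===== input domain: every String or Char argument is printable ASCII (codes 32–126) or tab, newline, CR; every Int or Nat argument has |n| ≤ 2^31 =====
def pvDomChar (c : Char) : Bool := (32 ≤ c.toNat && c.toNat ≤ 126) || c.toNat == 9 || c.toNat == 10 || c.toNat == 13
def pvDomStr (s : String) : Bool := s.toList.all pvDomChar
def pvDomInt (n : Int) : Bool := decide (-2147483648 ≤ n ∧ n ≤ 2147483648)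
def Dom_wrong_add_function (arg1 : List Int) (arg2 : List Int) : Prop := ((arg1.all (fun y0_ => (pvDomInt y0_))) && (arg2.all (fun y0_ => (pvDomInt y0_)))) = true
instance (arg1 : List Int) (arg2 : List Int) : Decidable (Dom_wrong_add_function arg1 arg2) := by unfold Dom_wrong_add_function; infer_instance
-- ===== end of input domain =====

-- ===== PORT A =====
-- B replaces the quadratic-in-m redundant inner loop by the closed form len(arg2)*x + sum(arg2);
-- Python A mutates arg1 in place, B returns a fresh list: the equivalence is about the return value only.

-- while-loop of A: recursion on the index, updating arg1 in place
def wrong_add_function_loop (arg1 : List Int) (arg2 : List Int) (idx : Nat) : List Int :=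
  if h : idx < arg1.length then
    -- for loop over arg2: each iteration recomputes sum([arg1[idx]+i for i in arg2])
    wrong_add_function_loop
      (arg1.set idx (arg2.foldl (fun _ _ => ((arg2.map (fun i => arg1.getD idx 0 + i)).sum)) 0))
      arg2 (idx + 1)
  else arg1
termination_by arg1.length - idx
decreasing_by simp [List.length_set]; omega

def wrong_add_function (arg1 : List Int) (arg2 : List Int) : List Int :=
  wrong_add_function_loop arg1 arg2 0

-- ===== PORT B =====
def wrong_add_function_alt (arg1 : List Int) (arg2 : List Int) : List Int :=
  let m : Int := arg2.length
  let s : Int := arg2.sum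
  arg1.map (fun x => m * x + s)

-- ===== PRECONDITION & SPEC =====
def Spec_wrong_add_function (arg1 : List Int) (arg2 : List Int) (out : List Int) : Prop := out = wrong_add_function_alt arg1 arg2
instance (arg1 : List Int) (arg2 : List Int) (out : List Int) : Decidable (Spec_wrong_add_function arg1 arg2 out) := by unfold Spec_wrong_add_function; infer_instance

-- ===== CLAIM (what is proved, stated in full; the proofs are below) =====
def Claim_equal_wrong_add_function : Prop := ∀ (arg1 : List Int) (arg2 : List Int), Dom_wrong_add_function arg1 arg2 → Spec_wrong_add_function arg1 arg2 (wrong_add_function arg1 arg2)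

-- ===== LEMMAS AND PROOFS =====

-- ===== VERDICT (by name: the statement is the Claim_ definition above) =====
lemma foldl_const_of_ne_nil (c : Int) : ∀ (l : List Int) (b : Int), l ≠ [] → l.foldl (fun _ _ => c) b = c := by
  intro l
  induction l with
  | nil => intro b h; exact absurd rfl h
  | cons a t ih =>
    intro b _
    simp only [List.foldl]
    cases t with
    | nil => rfl
    | cons a' t' => exact ih c (by simp)

lemma map_add_sum (x : Int) : ∀ (l : List Int), (l.map (fun i => x + i)).sum = (l.length : Int) * x + l.sum := by
  intro l
  induction l with
  | nil => simp
  | cons a t ih => simp [ih]; ring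

-- the per-element value A computes equals B's closed form
lemma inner_eq (x : Int) (arg2 : List Int) :
    arg2.foldl (fun _ _ => ((arg2.map (fun i => x + i)).sum)) 0
      = (arg2.length : Int) * x + arg2.sum := by
  cases arg2 with
  | nil => simp
  | cons a t =>
    rw [foldl_const_of_ne_nil _ _ _ (by simp)]
    exact map_add_sum x (a :: t)

lemma drop_succ_set (l : List Int) (i : Nat) (s : Int) :
    (l.set i s).drop (i+1) = l.drop (i+1) := by
  simp [List.drop_set]

lemma take_succ_set (l : List Int) (i : Nat) (s : Int) (h : i < l.length) :
    (l.set i s).take (i+1) = l.take i ++ [s] := by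
  have h1 : l.take (i+1) = l.take i ++ [l[i]] := by
    rw [List.take_add_one, List.getElem?_eq_getElem h]; rfl
  rw [List.take_set, h1]
  have hlen : (l.take i).length = i := by simp; omega
  rw [List.set_append_right _ _ (by omega)]
  simp [hlen]

-- the loop rewrites the suffix from idx with the closed form
lemma loop_eq_aux (arg2 : List Int) : ∀ (n : Nat) (arg1 : List Int) (idx : Nat), arg1.length - idx = n →
    wrong_add_function_loop arg1 arg2 idx
      = arg1.take idx ++ (arg1.drop idx).map (fun x => (arg2.length : Int) * x + arg2.sum) := by
  intro n
  induction n using Nat.strong_induction_on with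
  | _ n ih =>
    intro arg1 idx hn
    rw [wrong_add_function_loop.eq_def]
    split
    · rename_i h
      rw [ih (arg1.length - (idx + 1)) (by omega) _ (idx + 1) (by simp)]
      have hget : arg1.getD idx 0 = arg1[idx] := List.getD_eq_getElem _ _ h
      have hs : arg2.foldl (fun _ _ => ((arg2.map (fun i => arg1.getD idx 0 + i)).sum)) 0
          = (arg2.length : Int) * arg1[idx] + arg2.sum := by
        rw [inner_eq, hget]
      rw [take_succ_set arg1 idx _ h, drop_succ_set,
          List.drop_eq_getElem_cons h, hs]
      simp
      conv_rhs => rw [List.drop_eq_getElem_cons (by simpa using h)]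
      simp
    · rename_i h
      rw [List.drop_eq_nil_of_le (by omega)]
      simp [List.take_of_length_le (by omega : arg1.length ≤ idx)]

lemma loop_eq (arg2 : List Int) (arg1 : List Int) (idx : Nat) :
    wrong_add_function_loop arg1 arg2 idx
      = arg1.take idx ++ (arg1.drop idx).map (fun x => (arg2.length : Int) * x + arg2.sum) :=
  loop_eq_aux arg2 _ arg1 idx rfl

theorem wrong_add_function_spec : Claim_equal_wrong_add_function := by
  intro arg1 arg2 _
  unfold Spec_wrong_add_function wrong_add_function wrong_add_function_alt
  simpa using loop_eq arg2 arg1 0
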